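-- pv_equiv track=rewrite | github.com/manjumusei-design/Entrophy-Garden | EntrophyGarden/entropygarden/qr.py | _is_data_cell
-- ===== SOURCE A (Python) =====
-- _QR_ALIGNMENT = {
--     1: [],
--     2: [6, 18],
--     3: [6, 22],
--     4: [6, 26],
--     5: [6, 30],
--     6: [6, 34],
--     7: [6, 22, 38],
--     8: [6, 24, 42],
--     9: [6, 26, 46],
--     10: [6, 28, 50],
--     11: [6, 30, 54],
--     12: [6, 32, 58],
--     13: [6, 34, 62],
--     14: [6, 26, 46, 66],
--     15: [6, 26, 48, 70],
--     16: [6, 26, 50, 74],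
--     17: [6, 30, 54, 78],
--     18: [6, 30, 56, 82],
--     19: [6, 30, 58, 86],
--     20: [6, 34, 62, 90],
-- }
--
-- def _is_data_cell(r, c, size, version):
--     if r < 9 and c < 9:
--         return False
--     if r < 9 and c >= size - 8:
--         return False
--     if r == 6 or c ==6:
--         return False
--     # Timing
--     if r == 6 or c == 6:
--         return False
--     # Format info
--     if r == 8 or c == 8:
--         return False
--     # Dark module
--     if r == 4 * version + 9 and c == 8:
--         return False
--     # Alignment patterns
--     positions = _QR_ALIGNMENT.get(version, [])
--     for rp in positions:
--         for cp in positions: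
--             if abs(r - rp) <= 2 and abs(c - cp) <= 2:
--                 return False
--     # Return info
--     if version >= 7:
--         if r < 6 and c >= size - 11:
--             return False
--         if r >= size - 11 and c < 6:
--             return False
--     return True
-- ===== SOURCE B (Python) =====
-- def _near_align(first, last, step, x):
--     # x is within 2 of an alignment coordinate: either the fixed one at 6,
--     # or one of the arithmetic progression first, first+step, ..., last.
--     if abs(x - 6) <= 2:
--         return True
--     if first - 2 <= x <= last + 2:
--         d = (x - last) % step
--         return d <= 2 or d >= step - 2
--     return False
--
--
-- def _align_hit(version, r, c):
--     # Closed-form alignment-pattern test: the table rows are 6 plus an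
--     # arithmetic progression ending at 4*version+10 with an even-ceiling step.
--     if not (2 <= version <= 20):
--         return False
--     last = 4 * version + 10
--     count = version // 7 + 2
--     step = -((6 - last) // (2 * (count - 1))) * 2
--     first = last - (count - 2) * step
--     return _near_align(first, last, step, r) and _near_align(first, last, step, c)
--
--
-- def _is_data_cell(r, c, size, version):
--     if r < 9 and (c < 9 or c >= size - 8):
--         return False
--     if r == 6 or c == 6 or r == 8 or c == 8:
--         return False
--     if r == 4 * version + 9 and c == 8:
--         return False
--     if _align_hit(version, r, c):
--         return False
--     if version >= 7:
--         if r < 6 and c >= size - 11: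
--             return False
--         if r >= size - 11 and c < 6:
--             return False
--     return True
-- ===== Notes on version B (the rewrite author's own statement) =====
-- stated objective: alternative
-- what changed: Eliminates the alignment-position table lookup and the nested pair loop entirely: B derives the alignment grid in closed form (last coordinate 4v+10, count v//7+2, even-ceiling step) and decides nearness with a range check plus one modulus test, no list and no scan.
import Mathlib
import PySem

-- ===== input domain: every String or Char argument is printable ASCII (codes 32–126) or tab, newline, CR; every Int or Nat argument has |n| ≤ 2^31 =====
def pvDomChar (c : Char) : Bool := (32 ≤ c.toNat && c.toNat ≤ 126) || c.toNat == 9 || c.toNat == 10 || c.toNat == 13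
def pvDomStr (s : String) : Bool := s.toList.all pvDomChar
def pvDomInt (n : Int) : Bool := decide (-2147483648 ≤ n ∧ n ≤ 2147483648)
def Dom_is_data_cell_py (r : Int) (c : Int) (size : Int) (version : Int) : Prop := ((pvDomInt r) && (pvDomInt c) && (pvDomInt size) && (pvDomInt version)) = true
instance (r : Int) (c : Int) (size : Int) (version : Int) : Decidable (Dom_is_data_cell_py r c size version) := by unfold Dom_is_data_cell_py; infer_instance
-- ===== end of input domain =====

-- B replaces A's alignment table and nested pair loop with a closed-form arithmetic
-- membership test (last/count/step of the alignment progression plus a modulus check);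
-- objective: alternative algorithm, no list scan at all.


-- ===== PORT A =====
def qrAlignment (version : Int) : List Int :=
  if version == 1 then [] else
  if version == 2 then [6, 18] else
  if version == 3 then [6, 22] else
  if version == 4 then [6, 26] else
  if version == 5 then [6, 30] else
  if version == 6 then [6, 34] else
  if version == 7 then [6, 22, 38] else
  if version == 8 then [6, 24, 42] else
  if version == 9 then [6, 26, 46] else
  if version == 10 then [6, 28, 50] else
  if version == 11 then [6, 30, 54] else
  if version == 12 then [6, 32, 58] else
  if version == 13 then [6, 34, 62] else
  if version == 14 then [6, 26, 46, 66] else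
  if version == 15 then [6, 26, 48, 70] else
  if version == 16 then [6, 26, 50, 74] else
  if version == 17 then [6, 30, 54, 78] else
  if version == 18 then [6, 30, 56, 82] else
  if version == 19 then [6, 30, 58, 86] else
  if version == 20 then [6, 34, 62, 90] else []

def is_data_cell_py (r : Int) (c : Int) (size : Int) (version : Int) : Bool :=
  if r < 9 && c < 9 then false
  else if r < 9 && size - 8 <= c then false
  else if r == 6 || c == 6 then false
  else if r == 6 || c == 6 then false
  else if r == 8 || c == 8 then false
  else if r == 4 * version + 9 && c == 8 then false
  else
    let positions := qrAlignment version
    if positions.any (fun rp => positions.any (fun cp => |r - rp| <= 2 && |c - cp| <= 2)) then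
      false
    else if 7 <= version then
      if r < 6 && size - 11 <= c then false
      else if size - 11 <= r && c < 6 then false
      else true
    else true

-- ===== PORT B =====
def nearAlign (first last step : Int) (x : Int) : Bool :=
  if |x - 6| <= 2 then true
  else if first - 2 <= x && x <= last + 2 then
    let d := PySem.Int.mod (x - last) step
    d <= 2 || step - 2 <= d
  else false

def alignHit (version r c : Int) : Bool :=
  if !(2 <= version && version <= 20) then false
  else
    let last := 4 * version + 10
    let count := PySem.Int.floordiv version 7 + 2
    let step := -(PySem.Int.floordiv (6 - last) (2 * (count - 1))) * 2
    let first := last - (count - 2) * step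
    nearAlign first last step r && nearAlign first last step c

def is_data_cell_py_alt (r : Int) (c : Int) (size : Int) (version : Int) : Bool :=
  if r < 9 && (c < 9 || size - 8 <= c) then false
  else if r == 6 || c == 6 || r == 8 || c == 8 then false
  else if r == 4 * version + 9 && c == 8 then false
  else if alignHit version r c then false
  else if 7 <= version then
    if r < 6 && size - 11 <= c then false
    else if size - 11 <= r && c < 6 then false
    else true
  else true

-- ===== PRECONDITION & SPEC =====
def Spec_is_data_cell_py (r : Int) (c : Int) (size : Int) (version : Int) (out : Bool) : Prop := out = is_data_cell_py_alt r c size version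
instance (r : Int) (c : Int) (size : Int) (version : Int) (out : Bool) : Decidable (Spec_is_data_cell_py r c size version out) := by unfold Spec_is_data_cell_py; infer_instance

-- ===== CLAIM (what is proved, stated in full; the proofs are below) =====
def Claim_equal_is_data_cell_py : Prop := ∀ (r : Int) (c : Int) (size : Int) (version : Int), Dom_is_data_cell_py r c size version → Spec_is_data_cell_py r c size version (is_data_cell_py r c size version)

-- ===== LEMMAS AND PROOFS =====
-- the nested existential over pairs from one list factors into two independent scans
theorem any_pair_factor (l : List Int) (p q : Int → Bool) :
    (l.any fun a => l.any fun b => p a && q b) = (l.any p && l.any q) := by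
  apply Bool.eq_iff_iff.mpr
  simp only [List.any_eq_true, Bool.and_eq_true]
  constructor
  · rintro ⟨a, ha, b, hb, hp, hq⟩; exact ⟨⟨a, ha, hp⟩, ⟨b, hb, hq⟩⟩
  · rintro ⟨⟨a, ha, hp⟩, ⟨b, hb, hq⟩⟩; exact ⟨a, ha, b, hb, hp, hq⟩

-- B's closed-form nearness test, characterised as a proposition
theorem nearAlign_iff (f l s x : Int) (hs : 0 < s) :
    nearAlign f l s x = true ↔
      |x - 6| ≤ 2 ∨ (f - 2 ≤ x ∧ x ≤ l + 2 ∧ ((x - l) % s ≤ 2 ∨ s - 2 ≤ (x - l) % s)) := by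
  unfold nearAlign
  rw [PySem.Int.mod_eq_emod_of_pos hs]
  split_ifs with h1 h2 <;> simp_all [abs_le]

-- outside versions 2..20 the table has no alignment positions
theorem qrAlignment_empty (version : Int) (h : ¬ (2 ≤ version ∧ version ≤ 20)) :
    qrAlignment version = [] := by
  have pv : ∀ k : Int, version ≠ k → ¬((version == k) = true) := by
    intro k hk; simp [hk]
  by_cases h1 : version = 1
  · subst h1; rfl
  · unfold qrAlignment
    rw [if_neg (pv 1 (by omega)), if_neg (pv 2 (by omega)), if_neg (pv 3 (by omega)),
        if_neg (pv 4 (by omega)), if_neg (pv 5 (by omega)), if_neg (pv 6 (by omega)),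
        if_neg (pv 7 (by omega)), if_neg (pv 8 (by omega)), if_neg (pv 9 (by omega)),
        if_neg (pv 10 (by omega)), if_neg (pv 11 (by omega)), if_neg (pv 12 (by omega)),
        if_neg (pv 13 (by omega)), if_neg (pv 14 (by omega)), if_neg (pv 15 (by omega)),
        if_neg (pv 16 (by omega)), if_neg (pv 17 (by omega)), if_neg (pv 18 (by omega)),
        if_neg (pv 19 (by omega)), if_neg (pv 20 (by omega))]

-- B's closed-form alignment test agrees with A's nested scan of the table
set_option maxHeartbeats 2000000 in
theorem alignHit_eq (version r c : Int) :
    alignHit version r c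
      = ((qrAlignment version).any fun rp =>
          (qrAlignment version).any fun cp => decide (|r - rp| ≤ 2) && decide (|c - cp| ≤ 2)) := by
  rw [any_pair_factor]
  by_cases h : 2 ≤ version ∧ version ≤ 20
  · obtain ⟨h1, h2⟩ := h
    interval_cases version <;>
      (simp only [alignHit, qrAlignment]
       norm_num [PySem.Int.floordiv_eq_ediv_of_pos]
       congr 1 <;>
         (apply Bool.eq_iff_iff.mpr
          rw [nearAlign_iff _ _ _ _ (by norm_num)]
          simp [abs_le]
          omega))
  · have hb : (decide (2 ≤ version) && decide (version ≤ 20)) = false := by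
      simp only [Bool.and_eq_false_iff, decide_eq_false_iff_not]; omega
    simp [alignHit, hb, qrAlignment_empty version h]

-- ===== VERDICT (by name: the statement is the Claim_ definition above) =====
set_option maxHeartbeats 2000000 in
theorem is_data_cell_py_spec : Claim_equal_is_data_cell_py := by
  intro r c size version _
  unfold Spec_is_data_cell_py is_data_cell_py is_data_cell_py_alt
  simp only [alignHit_eq]
  generalize ((qrAlignment version).any fun rp =>
      (qrAlignment version).any fun cp => decide (|r - rp| ≤ 2) && decide (|c - cp| ≤ 2)) = S
  cases S <;> split_ifs <;> (try rfl) <;>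
    (simp only [Bool.and_eq_true, Bool.or_eq_true, decide_eq_true_eq, beq_iff_eq] at *; omega)
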